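-- pv_equiv track=rewrite | github.com/techroy23/torrent-tracker-hub | scripts/download_trackers.py | categorize_trackers
-- ===== SOURCE A (Python) =====
-- def categorize_trackers(trackers):
--     udp_ip = []
--     udp_domain = []
--     ws_trackers = []
--     wss_trackers = []
--     http_trackers = []
--     https_trackers = []
--
--     for tracker in trackers:
--         lower = tracker.lower()
--         if lower.startswith("http://"):
--             http_trackers.append(tracker)
--         elif lower.startswith("https://"):
--             https_trackers.append(tracker)
--         elif lower.startswith("udp://"):
--             host = tracker.split("://")[1].split("/")[0]
--             if host.replace(".", "").isdigit() or ":" in host: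
--                 udp_ip.append(tracker)
--             else:
--                 udp_domain.append(tracker)
--         elif lower.startswith("ws://"):
--             ws_trackers.append(tracker)
--         elif lower.startswith("wss://"):
--             wss_trackers.append(tracker)
--
--     return {
--         "udp_ip": sorted(udp_ip),
--         "udp_domain": sorted(udp_domain),
--         "ws": sorted(ws_trackers),
--         "wss": sorted(wss_trackers),
--         "http": sorted(http_trackers),
--         "https": sorted(https_trackers)
--     }
-- ===== SOURCE B (Python) =====
-- def categorize_trackers(trackers):
--     ordered = sorted(trackers)
--
--     def scheme(t):
--         low = t.lower()
--         if low.startswith("http://"):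
--             return "http"
--         if low.startswith("https://"):
--             return "https"
--         if low.startswith("udp://"):
--             host = t.split("://")[1].split("/")[0]
--             return "udp_ip" if host.replace(".", "").isdigit() or ":" in host else "udp_domain"
--         if low.startswith("ws://"):
--             return "ws"
--         if low.startswith("wss://"):
--             return "wss"
--         return None
--
--     return {name: [t for t in ordered if scheme(t) == name]
--             for name in ("udp_ip", "udp_domain", "ws", "wss", "http", "https")}
-- ===== Notes on version B (the rewrite author's own statement) =====
-- stated objective: alternative
-- what changed: B sorts the whole list once up front and builds each bucket as a filter over that globally sorted list via a scheme-classifier function, instead of A's six-accumulator loop followed by six per-bucket sorted() calls.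
import Mathlib
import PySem

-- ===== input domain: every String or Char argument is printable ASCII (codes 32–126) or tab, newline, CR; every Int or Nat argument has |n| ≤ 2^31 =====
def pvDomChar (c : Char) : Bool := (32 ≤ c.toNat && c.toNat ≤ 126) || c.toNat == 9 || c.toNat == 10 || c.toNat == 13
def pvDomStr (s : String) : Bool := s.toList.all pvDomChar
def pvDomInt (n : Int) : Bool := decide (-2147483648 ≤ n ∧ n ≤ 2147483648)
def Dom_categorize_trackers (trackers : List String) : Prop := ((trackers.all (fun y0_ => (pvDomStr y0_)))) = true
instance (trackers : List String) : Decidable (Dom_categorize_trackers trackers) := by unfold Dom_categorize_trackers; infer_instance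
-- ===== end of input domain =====

-- B sorts once up front and builds each bucket by filtering the globally sorted list with a
-- scheme classifier, instead of A's six-accumulator loop followed by six per-bucket sorts.

-- ===== PORT A =====
-- loop body of A's for-loop over the six accumulator lists
def pvStepA (st : List String × List String × List String × List String × List String × List String)
    (tracker : String) :
    List String × List String × List String × List String × List String × List String :=
  let (udp_ip, udp_domain, ws_t, wss_t, http_t, https_t) := st
  let low := PySem.Str.lower tracker
  if PySem.Str.startswith low "http://" then
    (udp_ip, udp_domain, ws_t, wss_t, http_t ++ [tracker], https_t)
  else if PySem.Str.startswith low "https://" then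
    (udp_ip, udp_domain, ws_t, wss_t, http_t, https_t ++ [tracker])
  else if PySem.Str.startswith low "udp://" then
    -- tracker.split("://")[1]: the guard guarantees "://" occurs, so the [1] is in range;
    -- .getD "" only makes the lookup total and never fires.
    let host := ((PySem.List.pyGet? ((PySem.Str.split? tracker "://").getD []) 1).getD "")
    let host := ((PySem.List.pyGet? ((PySem.Str.split? host "/").getD []) 0).getD "")
    if PySem.Str.strIsdigit (PySem.Str.replace host "." "") || PySem.Str.isIn ":" host then
      (udp_ip ++ [tracker], udp_domain, ws_t, wss_t, http_t, https_t)
    else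
      (udp_ip, udp_domain ++ [tracker], ws_t, wss_t, http_t, https_t)
  else if PySem.Str.startswith low "ws://" then
    (udp_ip, udp_domain, ws_t ++ [tracker], wss_t, http_t, https_t)
  else if PySem.Str.startswith low "wss://" then
    (udp_ip, udp_domain, ws_t, wss_t ++ [tracker], http_t, https_t)
  else st

def categorize_trackers (trackers : List String) : List (String × List String) :=
  let st := trackers.foldl pvStepA ([], [], [], [], [], [])
  let (udp_ip, udp_domain, ws_t, wss_t, http_t, https_t) := st
  [("udp_ip", PySem.List.sorted udp_ip (fun x => x) false),
   ("udp_domain", PySem.List.sorted udp_domain (fun x => x) false),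
   ("ws", PySem.List.sorted ws_t (fun x => x) false),
   ("wss", PySem.List.sorted wss_t (fun x => x) false),
   ("http", PySem.List.sorted http_t (fun x => x) false),
   ("https", PySem.List.sorted https_t (fun x => x) false)]

-- ===== PORT B =====
-- B's scheme(t) helper: the bucket name of a tracker, none if no scheme matches
def pvScheme (t : String) : Option String :=
  let low := PySem.Str.lower t
  if PySem.Str.startswith low "http://" then some "http"
  else if PySem.Str.startswith low "https://" then some "https"
  else if PySem.Str.startswith low "udp://" then
    let host := ((PySem.List.pyGet? ((PySem.Str.split? t "://").getD []) 1).getD "")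
    let host := ((PySem.List.pyGet? ((PySem.Str.split? host "/").getD []) 0).getD "")
    if PySem.Str.strIsdigit (PySem.Str.replace host "." "") || PySem.Str.isIn ":" host then
      some "udp_ip"
    else some "udp_domain"
  else if PySem.Str.startswith low "ws://" then some "ws"
  else if PySem.Str.startswith low "wss://" then some "wss"
  else none

def categorize_trackers_alt (trackers : List String) : List (String × List String) :=
  let ordered := PySem.List.sorted trackers (fun x => x) false
  ["udp_ip", "udp_domain", "ws", "wss", "http", "https"].map
    (fun name => (name, ordered.filter (fun t => pvScheme t == some name)))

-- ===== PRECONDITION & SPEC =====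
def Spec_categorize_trackers (trackers : List String) (out : List (String × List String)) : Prop := out = categorize_trackers_alt trackers
instance (trackers : List String) (out : List (String × List String)) : Decidable (Spec_categorize_trackers trackers out) := by unfold Spec_categorize_trackers; infer_instance

-- ===== CLAIM (what is proved, stated in full; the proofs are below) =====
def Claim_equal_categorize_trackers : Prop := ∀ (trackers : List String), Dom_categorize_trackers trackers → Spec_categorize_trackers trackers (categorize_trackers trackers)

-- ===== LEMMAS AND PROOFS =====

-- A's loop computes, in each accumulator, the filter of the input by the matching scheme
theorem pvFoldA_eq (xs : List String) (a b c d e f : List String) :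
    xs.foldl pvStepA (a, b, c, d, e, f) =
      (a ++ xs.filter (fun t => pvScheme t == some "udp_ip"),
       b ++ xs.filter (fun t => pvScheme t == some "udp_domain"),
       c ++ xs.filter (fun t => pvScheme t == some "ws"),
       d ++ xs.filter (fun t => pvScheme t == some "wss"),
       e ++ xs.filter (fun t => pvScheme t == some "http"),
       f ++ xs.filter (fun t => pvScheme t == some "https")) := by
  induction xs generalizing a b c d e f with
  | nil => simp
  | cons t ts ih =>
    simp only [List.foldl_cons, List.filter_cons]
    by_cases h1 : PySem.Str.startswith (PySem.Str.lower t) "http://"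
    · have hs : pvScheme t = some "http" := by
        simp only [pvScheme]; rw [if_pos h1]
      have hst : pvStepA (a, b, c, d, e, f) t = (a, b, c, d, e ++ [t], f) := by
        simp only [pvStepA]; rw [if_pos h1]
      rw [hst, ih]; simp [hs]
    · by_cases h2 : PySem.Str.startswith (PySem.Str.lower t) "https://"
      · have hs : pvScheme t = some "https" := by
          simp only [pvScheme]; rw [if_neg h1, if_pos h2]
        have hst : pvStepA (a, b, c, d, e, f) t = (a, b, c, d, e, f ++ [t]) := by
          simp only [pvStepA]; rw [if_neg h1, if_pos h2]
        rw [hst, ih]; simp [hs]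
      · by_cases h3 : PySem.Str.startswith (PySem.Str.lower t) "udp://"
        · by_cases h6 : PySem.Str.strIsdigit (PySem.Str.replace
              ((PySem.List.pyGet? ((PySem.Str.split?
                ((PySem.List.pyGet? ((PySem.Str.split? t "://").getD []) 1).getD "") "/").getD []) 0).getD "") "." "")
              || PySem.Str.isIn ":"
              ((PySem.List.pyGet? ((PySem.Str.split?
                ((PySem.List.pyGet? ((PySem.Str.split? t "://").getD []) 1).getD "") "/").getD []) 0).getD "")
          · have hs : pvScheme t = some "udp_ip" := by
              simp only [pvScheme]; rw [if_neg h1, if_neg h2, if_pos h3, if_pos h6]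
            have hst : pvStepA (a, b, c, d, e, f) t = (a ++ [t], b, c, d, e, f) := by
              simp only [pvStepA]; rw [if_neg h1, if_neg h2, if_pos h3, if_pos h6]
            rw [hst, ih]; simp [hs]
          · have hs : pvScheme t = some "udp_domain" := by
              simp only [pvScheme]; rw [if_neg h1, if_neg h2, if_pos h3, if_neg h6]
            have hst : pvStepA (a, b, c, d, e, f) t = (a, b ++ [t], c, d, e, f) := by
              simp only [pvStepA]; rw [if_neg h1, if_neg h2, if_pos h3, if_neg h6]
            rw [hst, ih]; simp [hs]
        · by_cases h4 : PySem.Str.startswith (PySem.Str.lower t) "ws://"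
          · have hs : pvScheme t = some "ws" := by
              simp only [pvScheme]; rw [if_neg h1, if_neg h2, if_neg h3, if_pos h4]
            have hst : pvStepA (a, b, c, d, e, f) t = (a, b, c ++ [t], d, e, f) := by
              simp only [pvStepA]; rw [if_neg h1, if_neg h2, if_neg h3, if_pos h4]
            rw [hst, ih]; simp [hs]
          · by_cases h5 : PySem.Str.startswith (PySem.Str.lower t) "wss://"
            · have hs : pvScheme t = some "wss" := by
                simp only [pvScheme]; rw [if_neg h1, if_neg h2, if_neg h3, if_neg h4, if_pos h5]
              have hst : pvStepA (a, b, c, d, e, f) t = (a, b, c, d ++ [t], e, f) := by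
                simp only [pvStepA]; rw [if_neg h1, if_neg h2, if_neg h3, if_neg h4, if_pos h5]
              rw [hst, ih]; simp [hs]
            · have hs : pvScheme t = none := by
                simp only [pvScheme]; rw [if_neg h1, if_neg h2, if_neg h3, if_neg h4, if_neg h5]
              have hst : pvStepA (a, b, c, d, e, f) t = (a, b, c, d, e, f) := by
                simp only [pvStepA]; rw [if_neg h1, if_neg h2, if_neg h3, if_neg h4, if_neg h5]
              rw [hst, ih]; simp [hs]

-- sorting a filtered list = filtering the sorted list (Python sort is a total order on strings)
theorem pvSorted_filter (p : String → Bool) (xs : List String) :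
    PySem.List.sorted (xs.filter p) (fun x => x) false =
      (PySem.List.sorted xs (fun x => x) false).filter p := by
  apply PySem.List.sorted_id_eq_of_perm_of_pairwise
  · exact (PySem.List.sorted_perm xs (fun x => x) false).filter p
  · exact (PySem.List.sorted_pairwise xs (fun x => x)).filter p

-- ===== VERDICT (by name: the statement is the Claim_ definition above) =====
theorem categorize_trackers_spec : Claim_equal_categorize_trackers := by
  intro trackers _
  show categorize_trackers trackers = categorize_trackers_alt trackers
  simp only [categorize_trackers, categorize_trackers_alt, pvFoldA_eq, List.nil_append,
    List.map_cons, List.map_nil, pvSorted_filter]
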